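-- pv_equiv track=rewrite | github.com/MertKocyigit/tr-marketplace-commission-kit | scripts/n11_extract_commissions.py | _collapse_repeated_bigrams
-- ===== SOURCE A (Python) =====
-- from typing import Dict, List, Optional
--
-- def _collapse_repeated_bigrams(phrase: str) -> str:
--     """
--     'Kara Avı Kara Avı Kara Avı' -> 'Kara Avı'
--     basit bigram tekrarı bastırma
--     """
--     toks = phrase.split()
--     if len(toks) < 4:
--         return phrase.strip()
--     res: List[str] = []
--     i = 0
--     while i < len(toks):
--         if i+1 < len(toks) and len(res) >= 2 and toks[i] == res[-2] and toks[i+1] == res[-1]: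
--             # aynı bigram tekrar ediyorsa atla
--             i += 2
--             continue
--         res.append(toks[i])
--         i += 1
--     return " ".join(res).strip()
-- ===== SOURCE B (Python) =====
-- from typing import List
--
-- def _collapse_repeated_bigrams(phrase: str) -> str:
--     toks = phrase.split()
--     if len(toks) < 4:
--         return phrase.strip()
--     res: List[str] = []
--     for tok in toks:
--         res.append(tok)
--         if len(res) >= 4 and res[-1] == res[-3] and res[-2] == res[-4]:
--             del res[-2:]
--     return " ".join(res).strip()
-- ===== Notes on version B (the rewrite author's own statement) =====
-- stated objective: simpler
-- what changed: Replaced the index-based while loop with lookahead-and-skip (i+=2 on a repeated bigram) by a single for-loop over the tokens that uses the result list as a stack: push each token and retract the last two when they duplicate the two beneath them.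
import Mathlib
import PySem

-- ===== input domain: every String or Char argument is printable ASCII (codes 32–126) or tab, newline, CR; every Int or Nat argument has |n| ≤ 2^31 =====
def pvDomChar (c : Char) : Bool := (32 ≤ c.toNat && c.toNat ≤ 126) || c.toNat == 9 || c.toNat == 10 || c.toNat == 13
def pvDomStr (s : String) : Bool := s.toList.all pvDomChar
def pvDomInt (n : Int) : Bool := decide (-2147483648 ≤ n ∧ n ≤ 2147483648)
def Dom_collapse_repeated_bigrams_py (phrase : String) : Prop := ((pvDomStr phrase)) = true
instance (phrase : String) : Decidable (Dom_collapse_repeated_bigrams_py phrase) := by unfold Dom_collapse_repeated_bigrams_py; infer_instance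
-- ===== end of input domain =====

-- B replaces A's index-based lookahead-and-skip while loop by a single pass that uses the
-- result list as a stack, retracting a just-completed duplicate bigram (objective: simpler).

-- ===== PORT A =====
-- A's `res` list is kept REVERSED (Python append = cons here, res[-1] = head, res[-2] = second);
-- the final `" ".join(res)` reverses it back.  The while loop is the recursion on index i below.
def pvLoopA (toks : List String) (i : Nat) (rres : List String) : List String :=
  if i < toks.length then
    if i + 1 < toks.length ∧ 2 ≤ rres.length ∧
        toks.getD i "" = rres.getD 1 "" ∧ toks.getD (i + 1) "" = rres.getD 0 "" then
      pvLoopA toks (i + 2) rres            -- aynı bigram tekrar ediyorsa atla (i += 2; continue)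
    else
      pvLoopA toks (i + 1) (toks.getD i "" :: rres)   -- res.append(toks[i]); i += 1
  else rres
termination_by toks.length - i

def collapse_repeated_bigrams_py (phrase : String) : String :=
  let toks := PySem.Str.split₀ phrase
  if toks.length < 4 then PySem.Str.strip phrase
  else PySem.Str.strip (PySem.Str.join " " (pvLoopA toks 0 []).reverse)

-- ===== PORT B =====
-- B's `res` stack is likewise kept REVERSED (push = cons); `del res[-2:]` drops the two heads.
def pvStepB (rres : List String) (tok : String) : List String :=
  match tok :: rres with
  | a :: b :: c :: d :: t =>               -- len(res) >= 4 after the push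
    if a = c ∧ b = d then c :: d :: t      -- res[-1]==res[-3] and res[-2]==res[-4]: del res[-2:]
    else a :: b :: c :: d :: t
  | r => r

def collapse_repeated_bigrams_py_alt (phrase : String) : String :=
  let toks := PySem.Str.split₀ phrase
  if toks.length < 4 then PySem.Str.strip phrase
  else PySem.Str.strip (PySem.Str.join " " (toks.foldl pvStepB []).reverse)

-- ===== PRECONDITION & SPEC =====
def Spec_collapse_repeated_bigrams_py (phrase : String) (out : String) : Prop := out = collapse_repeated_bigrams_py_alt phrase
instance (phrase : String) (out : String) : Decidable (Spec_collapse_repeated_bigrams_py phrase out) := by unfold Spec_collapse_repeated_bigrams_py; infer_instance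

-- ===== CLAIM (what is proved, stated in full; the proofs are below) =====
def Claim_equal_collapse_repeated_bigrams_py : Prop := ∀ (phrase : String), Dom_collapse_repeated_bigrams_py phrase → Spec_collapse_repeated_bigrams_py phrase (collapse_repeated_bigrams_py phrase)

-- ===== LEMMAS AND PROOFS =====

-- invariant: the (reversed) result list contains no adjacent repeated bigram
def pvNoRep : List String → Prop
  | a :: b :: c :: d :: t => ¬(a = c ∧ b = d) ∧ pvNoRep (b :: c :: d :: t)
  | _ => True

-- coupling of state and next token: if res ends  … a b a  then the next token is not b
def pvSafe (toks : List String) (i : Nat) (rres : List String) : Prop :=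
  ∀ a b t', rres = a :: b :: a :: t' → i < toks.length → toks.getD i "" ≠ b

-- B retracts A's skipped bigram in two pushes: push r2 (maybe pop), push r1 (maybe pop) = identity
lemma pvSkipTwo (r1 r2 : String) (rest : List String) (h : pvNoRep (r1 :: r2 :: rest)) :
    pvStepB (pvStepB (r1 :: r2 :: rest) r2) r1 = r1 :: r2 :: rest := by
  match rest with
  | [] => simp [pvStepB]
  | [w] =>
      by_cases hw : r1 = w
      · subst hw; simp [pvStepB]
      · simp [pvStepB, hw]
  | w :: u :: t'' =>
      by_cases hw : r1 = w
      · subst hw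
        have hru : ¬(r2 = u) := by
          have := h.1
          intro hh; exact this ⟨rfl, hh⟩
        simp [pvStepB, hru]
      · simp [pvStepB, hw]

lemma pvLoopA_eq_foldl (toks : List String) :
    ∀ (n i : Nat) (rres : List String), toks.length - i ≤ n →
      pvNoRep rres → pvSafe toks i rres →
      pvLoopA toks i rres = (toks.drop i).foldl pvStepB rres := by
  intro n
  induction n with
  | zero =>
      intro i rres hn _ _
      have hi : ¬ i < toks.length := by omega
      rw [pvLoopA, if_neg hi, List.drop_eq_nil_of_le (by omega), List.foldl_nil]
  | succ n ih =>
      intro i rres hn hnr hsafe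
      by_cases hi : i < toks.length
      · have hdrop : toks.drop i = toks[i] :: toks.drop (i + 1) := List.drop_eq_getElem_cons hi
        have hgd : toks.getD i "" = toks[i] := List.getD_eq_getElem _ _ hi
        by_cases hc : i + 1 < toks.length ∧ 2 ≤ rres.length ∧
            toks.getD i "" = rres.getD 1 "" ∧ toks.getD (i + 1) "" = rres.getD 0 ""
        · -- skip branch
          obtain ⟨hi1, hlen, he1, he2⟩ := hc
          match rres, hlen with
          | r1 :: r2 :: rest, _ =>
            simp only [List.getD_cons_zero, List.getD_cons_succ] at he1 he2
            have hdrop1 : toks.drop (i + 1) = toks[i + 1] :: toks.drop (i + 2) :=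
              List.drop_eq_getElem_cons hi1
            have hgd1 : toks.getD (i + 1) "" = toks[i + 1] := List.getD_eq_getElem _ _ hi1
            have hsafe2 : pvSafe toks (i + 2) (r1 :: r2 :: rest) := by
              intro a b t' hpat _
              exfalso
              obtain ⟨ha, hb, hrest⟩ : r1 = a ∧ r2 = b ∧ rest = a :: t' := by
                injection hpat with h1 h2; injection h2 with h3 h4; exact ⟨h1, h3, h4⟩
              exact (hsafe r1 r2 t' (by rw [hrest, ← ha]) hi) he1
            rw [pvLoopA, if_pos hi, if_pos ⟨hi1, by simp, he1, he2⟩]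
            rw [ih (i + 2) (r1 :: r2 :: rest) (by omega) hnr hsafe2]
            rw [hdrop, hdrop1, List.foldl_cons, List.foldl_cons]
            rw [← hgd, ← hgd1, he1, he2, pvSkipTwo r1 r2 rest hnr]
        · -- append branch
          push Not at hc
          set t := toks.getD i "" with ht
          -- no pop happens when pushing t
          have hstep : pvStepB rres t = t :: rres := by
            match rres with
            | [] => simp [pvStepB]
            | [x] => simp [pvStepB]
            | [x, y] => simp [pvStepB]
            | x :: y :: z :: tt =>
              have hnp : ¬(t = y ∧ x = z) := by
                rintro ⟨hty, hxz⟩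
                exact hsafe x y tt (by rw [hxz]) hi hty
              simp [pvStepB, hnp]
          have hnr' : pvNoRep (t :: rres) := by
            match rres with
            | [] => trivial
            | [x] => trivial
            | [x, y] => trivial
            | x :: y :: z :: tt =>
              refine ⟨?_, hnr⟩
              rintro ⟨hty, hxz⟩
              exact hsafe x y tt (by rw [hxz]) hi hty
          have hsafe' : pvSafe toks (i + 1) (t :: rres) := by
            intro a b t' hpat hi1
            -- t :: rres = a :: b :: a :: t'  means rres = b :: a :: t' with a = t
            obtain ⟨ha, hr⟩ : t = a ∧ rres = b :: a :: t' := by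
              injection hpat with h1 h2; exact ⟨h1, h2⟩
            have h2le : 2 ≤ rres.length := by rw [hr]; simp
            have hgd1' : t = rres.getD 1 "" := by rw [hr, ← ha]; rfl
            have hgd0' : rres.getD 0 "" = b := by rw [hr]; rfl
            rw [← hgd0']
            exact hc hi1 h2le hgd1'
          rw [pvLoopA, if_pos hi, if_neg (by push Not; exact hc)]
          rw [ih (i + 1) (t :: rres) (by omega) hnr' hsafe']
          rw [hdrop, List.foldl_cons, ← hgd, hstep]
      · rw [pvLoopA, if_neg hi, List.drop_eq_nil_of_le (by omega), List.foldl_nil]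

-- ===== VERDICT (by name: the statement is the Claim_ definition above) =====
theorem collapse_repeated_bigrams_py_spec : Claim_equal_collapse_repeated_bigrams_py := by
  intro phrase _
  unfold Spec_collapse_repeated_bigrams_py collapse_repeated_bigrams_py collapse_repeated_bigrams_py_alt
  simp only []
  set toks := PySem.Str.split₀ phrase with htoks
  by_cases h4 : toks.length < 4
  · simp [h4]
  · have := pvLoopA_eq_foldl toks toks.length 0 [] (by omega) trivial (by intro a b t' h _; cases h)
    simp only [List.drop_zero] at this
    simp [h4, this]
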